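-- pv_equiv track=rewrite | github.com/seangerrykelly/leetcode-problems | findSubarraysWithEqualSum.py | findSubarrays
-- ===== SOURCE A (Python) =====
-- def findSubarrays(nums):
--     """
--     :type nums: List[int]
--     :rtype: bool
--     """
--     subarrays = {}
--     first, second = 0, 1
--     for i in range(len(nums) - 1):
--         left, right = nums[first], nums[second]
--         subarraySum = left + right
--         if subarraySum not in subarrays:
--             subarrays[subarraySum] = [[first, second]]
--         else:
--             return True
--         first += 1
--         second += 1
--     return False
-- ===== SOURCE B (Python) =====
-- def findSubarrays(nums):
--     sums = [nums[i] + nums[i + 1] for i in range(len(nums) - 1)]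
--     sums.sort()
--     for a, b in zip(sums, sums[1:]):
--         if a == b:
--             return True
--     return False
-- ===== Notes on version B (the rewrite author's own statement) =====
-- stated objective: alternative
-- what changed: Replaces the dict-of-seen-sums early-exit scan with building the list of adjacent-pair sums, sorting it, and scanning once for an equal adjacent pair (sort-based duplicate detection).
import Mathlib
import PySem

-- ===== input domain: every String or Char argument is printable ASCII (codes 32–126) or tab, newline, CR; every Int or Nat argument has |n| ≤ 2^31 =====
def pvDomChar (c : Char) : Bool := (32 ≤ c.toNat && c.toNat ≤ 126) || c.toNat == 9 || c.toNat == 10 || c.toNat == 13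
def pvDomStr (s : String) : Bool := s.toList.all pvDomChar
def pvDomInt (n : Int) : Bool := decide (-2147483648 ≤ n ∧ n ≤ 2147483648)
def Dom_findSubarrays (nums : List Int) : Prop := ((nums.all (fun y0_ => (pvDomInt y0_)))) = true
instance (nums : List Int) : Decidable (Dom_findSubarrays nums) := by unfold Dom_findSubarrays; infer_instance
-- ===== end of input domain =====

-- B replaces A's dict-of-seen-sums early-exit scan by building the list of adjacent-pair sums,
-- sorting it and scanning once for an equal adjacent pair (alternative algorithm, same result).

-- ===== PORT A =====
-- the 'for i in range(len(nums)-1)' loop with dict state, first/second counters and early return True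
def findSubarraysLoopA (nums : List Int) :
    List Int → PySem.Dict Int (List (List Int)) → Int → Int → Bool
  | [], _, _, _ => false
  | _ :: rest, subarrays, first, second =>
    let left := PySem.List.pyGetD nums first 0
    let right := PySem.List.pyGetD nums second 0
    let subarraySum := left + right
    if !(subarrays.contains subarraySum) then
      findSubarraysLoopA nums rest (subarrays.insert subarraySum [[first, second]])
        (first + 1) (second + 1)
    else
      true

def findSubarrays (nums : List Int) : Bool :=
  findSubarraysLoopA nums (PySem.List.pyRange 0 (PySem.List.len nums - 1) 1)
    PySem.Dict.empty 0 1

-- ===== PORT B =====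
-- the 'for a, b in zip(sums, sums[1:])' loop with early return True
def findSubarraysAdjScan : List (Int × Int) → Bool
  | [] => false
  | (a, b) :: rest => if a == b then true else findSubarraysAdjScan rest

def findSubarrays_alt (nums : List Int) : Bool :=
  let sums := (PySem.List.pyRange 0 (PySem.List.len nums - 1) 1).map
    (fun i => PySem.List.pyGetD nums i 0 + PySem.List.pyGetD nums (i + 1) 0)
  let ss := PySem.List.sorted sums (fun x => x) false
  findSubarraysAdjScan (ss.zip (PySem.List.slice ss (some 1) none))

-- ===== PRECONDITION & SPEC =====
def Spec_findSubarrays (nums : List Int) (out : Bool) : Prop := out = findSubarrays_alt nums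
instance (nums : List Int) (out : Bool) : Decidable (Spec_findSubarrays nums out) := by unfold Spec_findSubarrays; infer_instance

-- ===== CLAIM (what is proved, stated in full; the proofs are below) =====
def Claim_equal_findSubarrays : Prop := ∀ (nums : List Int), Dom_findSubarrays nums → Spec_findSubarrays nums (findSubarrays nums)

-- ===== LEMMAS AND PROOFS =====

-- the sums A computes from step 'first' on, for n more steps
def pvSegSums (nums : List Int) (first : Int) : Nat → List Int
  | 0 => []
  | n + 1 => (PySem.List.pyGetD nums first 0 + PySem.List.pyGetD nums (first + 1) 0)
      :: pvSegSums nums (first + 1) n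

-- abstract seen-set duplicate scan (A's dict reduced to the set of its keys)
def pvSeenScan : List Int → List Int → Bool
  | [], _ => false
  | x :: xs, seen => if seen.contains x then true else pvSeenScan xs (x :: seen)

theorem loopA_eq_seenScan (nums : List Int) (L : List Int)
    (d : PySem.Dict Int (List (List Int))) (first second : Int) (seen : List Int)
    (hsec : second = first + 1)
    (h : ∀ x, d.contains x = seen.contains x) :
    findSubarraysLoopA nums L d first second
      = pvSeenScan (pvSegSums nums first L.length) seen := by
  induction L generalizing d first second seen with
  | nil => rfl
  | cons a rest ih =>
    subst hsec
    simp only [findSubarraysLoopA, pvSegSums, List.length_cons, pvSeenScan, h]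
    cases hc : seen.contains (PySem.List.pyGetD nums first 0 + PySem.List.pyGetD nums (first + 1) 0) with
    | false =>
      simp only [Bool.not_false, if_true, Bool.false_eq_true, if_false]
      exact ih _ _ _ _ rfl (fun x => by
        simp [PySem.Dict.contains_insert, h, Bool.beq_eq_decide_eq])
    | true => simp

theorem seenScan_iff (xs seen : List Int) :
    pvSeenScan xs seen = true ↔ ¬ xs.Nodup ∨ ∃ x ∈ xs, x ∈ seen := by
  induction xs generalizing seen with
  | nil => simp [pvSeenScan]
  | cons a xs ih =>
    simp only [pvSeenScan]
    by_cases hc : a ∈ seen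
    · simp [hc]
    · rw [if_neg (by simpa using hc), ih]
      constructor
      · rintro (hnd | ⟨x, hx, hxs⟩)
        · exact Or.inl (by simp_all [List.nodup_cons])
        · rcases List.mem_cons.mp hxs with rfl | hxseen
          · exact Or.inl (by simp [List.nodup_cons, hx])
          · exact Or.inr ⟨x, List.mem_cons_of_mem _ hx, hxseen⟩
      · rintro (hnd | ⟨x, hx, hxseen⟩)
        · rw [List.nodup_cons] at hnd
          by_cases hm : a ∈ xs
          · exact Or.inr ⟨a, hm, List.mem_cons_self⟩
          · exact Or.inl (fun hxnd => hnd ⟨hm, hxnd⟩)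
        · rcases List.mem_cons.mp hx with rfl | hx'
          · exact absurd hxseen hc
          · exact Or.inr ⟨x, hx', List.mem_cons_of_mem _ hxseen⟩

theorem segSums_eq_map (nums : List Int) (a : Int) (n : Nat) :
    ((PySem.List.pyRange a (a + n) 1).map
      (fun i => PySem.List.pyGetD nums i 0 + PySem.List.pyGetD nums (i + 1) 0))
      = pvSegSums nums a n := by
  induction n generalizing a with
  | zero =>
    have : (PySem.List.pyRange a (a + (0:Nat)) 1).length = 0 := by
      rw [PySem.List.length_pyRange_one]; omega
    rw [List.eq_nil_of_length_eq_zero this]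
    rfl
  | succ n ih =>
    rw [PySem.List.pyRange_one_cons (by push_cast; omega)]
    simp only [List.map_cons, pvSegSums]
    have h2 : a + ((n:Nat) + 1 : Nat) = (a + 1) + (n : Nat) := by push_cast; ring
    rw [h2, ih]

theorem adjScan_sorted_iff (l : List Int) (h : l.Pairwise (· ≤ ·)) :
    findSubarraysAdjScan (l.zip l.tail) = true ↔ ¬ l.Nodup := by
  induction l with
  | nil => simp [findSubarraysAdjScan]
  | cons a t ih =>
    cases t with
    | nil => simp [findSubarraysAdjScan]
    | cons b t' =>
      simp only [List.tail_cons, List.zip_cons_cons, findSubarraysAdjScan]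
      rw [List.pairwise_cons] at h
      obtain ⟨hab, hbt⟩ := h
      by_cases heq : a = b
      · subst heq
        simp [List.nodup_cons]
      · rw [if_neg (by simpa using heq)]
        have htail := ih hbt
        rw [List.tail_cons] at htail
        rw [htail]
        have halt : a < b := lt_of_le_of_ne (hab b List.mem_cons_self) heq
        have hnotmem : a ∉ b :: t' := by
          intro hm
          rcases List.mem_cons.mp hm with rfl | hm'
          · exact heq rfl
          · have hble : b ≤ a := (List.pairwise_cons.mp hbt).1 a hm'
            omega
        constructor
        · exact fun hnd hand => hnd (List.Nodup.of_cons hand)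
        · exact fun hnd hbt' => hnd (List.nodup_cons.mpr ⟨hnotmem, hbt'⟩)

theorem seenScan_eq_adjScan_sorted (l : List Int) :
    pvSeenScan l []
      = findSubarraysAdjScan ((PySem.List.sorted l (fun x => x) false).zip
          (PySem.List.sorted l (fun x => x) false).tail) := by
  have hperm := PySem.List.sorted_perm l (fun x => x) false
  have hpw : (PySem.List.sorted l (fun x => x) false).Pairwise (· ≤ ·) := by
    simpa using PySem.List.sorted_pairwise l (fun x => x)
  rw [Bool.eq_iff_iff, seenScan_iff, adjScan_sorted_iff _ hpw, hperm.nodup_iff]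
  simp

theorem findSubarrays_eq_alt (nums : List Int) :
    findSubarrays nums = findSubarrays_alt nums := by
  unfold findSubarrays findSubarrays_alt
  simp only [PySem.List.slice_from_one]
  rw [loopA_eq_seenScan nums _ _ 0 1 [] (by norm_num)
    (fun x => by simp [PySem.Dict.contains_empty])]
  rw [seenScan_eq_adjScan_sorted]
  by_cases hlen : 0 ≤ PySem.List.len nums - 1
  · obtain ⟨n, hn⟩ := Int.eq_ofNat_of_zero_le hlen
    rw [hn, PySem.List.length_pyRange_one]
    have h0 : ((n : Int) - 0).toNat = n := by omega
    rw [h0]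
    have := segSums_eq_map nums 0 n
    rw [zero_add] at this
    rw [this]
  · have hnil : PySem.List.pyRange 0 (PySem.List.len nums - 1) 1 = [] := by
      apply List.eq_nil_of_length_eq_zero
      rw [PySem.List.length_pyRange_one]; omega
    rw [hnil]
    rfl

-- ===== VERDICT (by name: the statement is the Claim_ definition above) =====
theorem findSubarrays_spec : Claim_equal_findSubarrays := by
  intro nums _
  unfold Spec_findSubarrays
  exact findSubarrays_eq_alt nums
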